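-- pv_equiv track=rewrite | github.com/Juunary/Ai_coding_study | TopoConstrained-NeuroBrep-MVP/assets/make_labels_from_xyzc.py | build_layer_mapping
-- ===== SOURCE A (Python) =====
-- def build_layer_mapping(groups):
--     layer_to_group = {}
--     conflicts = {}
--     for grp_idx, (grp_name, layers) in enumerate(groups):
--         for L in layers:
--             if L in layer_to_group:
--                 # record conflict: existing owner vs new owner
--                 prev = layer_to_group[L]
--                 # keep previous (because groups is ordered by precedence with Body first)
--                 conflicts.setdefault(L, (prev, grp_name))
--             else:
--                 layer_to_group[L] = grp_name
--     return layer_to_group, conflicts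
-- ===== SOURCE B (Python) =====
-- def build_layer_mapping(groups):
--     # Index-based two-pass reconstruction: build a layer -> [group names] index,
--     # derive owners from the heads, then emit conflicts at second-occurrence time.
--     pairs = [(g, L) for g, layers in groups for L in layers]
--     index = {}
--     for g, L in pairs:
--         index.setdefault(L, []).append(g)
--     layer_to_group = {L: gs[0] for L, gs in index.items()}
--     conflicts = {}
--     count = {}
--     for g, L in pairs:
--         count[L] = count.get(L, 0) + 1
--         if count[L] == 2:
--             conflicts[L] = (layer_to_group[L], g)
--     return layer_to_group, conflicts
-- ===== Notes on version B (the rewrite author's own statement) =====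
-- stated objective: alternative
-- what changed: Replaces A's single nested loop that mutates two dicts with a flattened (group,layer) pair stream and an index-based two-pass reconstruction: pass 1 builds a layer->group-list index and derives owners from its heads, pass 2 counts occurrences and emits each conflict at its second occurrence.
import Mathlib
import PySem

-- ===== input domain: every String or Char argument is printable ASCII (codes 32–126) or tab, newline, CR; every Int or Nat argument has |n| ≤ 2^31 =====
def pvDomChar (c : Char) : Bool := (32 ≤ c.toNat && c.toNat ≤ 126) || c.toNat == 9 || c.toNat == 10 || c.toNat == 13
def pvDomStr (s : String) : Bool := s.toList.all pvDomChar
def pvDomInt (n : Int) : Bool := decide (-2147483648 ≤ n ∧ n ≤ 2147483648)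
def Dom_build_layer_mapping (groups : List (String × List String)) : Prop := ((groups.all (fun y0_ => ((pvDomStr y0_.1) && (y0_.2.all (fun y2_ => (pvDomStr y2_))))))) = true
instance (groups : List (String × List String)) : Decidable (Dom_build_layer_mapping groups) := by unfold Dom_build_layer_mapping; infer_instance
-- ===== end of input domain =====

-- B re-derives the same two dicts from a flattened pair stream via a layer->groups index and an
-- occurrence-counting second pass (alternative decomposition, same cost); proved equal to A everywhere.


-- ===== PORT A =====
def build_layer_mapping (groups : List (String × List String)) :
    (List (String × String)) × (List (String × String × String)) :=
  let st := (PySem.List.enumerate groups).foldl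
    (fun (st : PySem.Dict String String × PySem.Dict String (String × String)) gp =>
      gp.2.2.foldl
        (fun (st : PySem.Dict String String × PySem.Dict String (String × String)) L =>
          if st.1.contains L then
            -- prev = layer_to_group[L]; the key is present, so Python cannot raise: getD is exact
            let prev := st.1.getD L ""
            (st.1, st.2.setdefault L (prev, gp.2.1))
          else
            (st.1.insert L gp.2.1, st.2))
        st)
    (PySem.Dict.empty, PySem.Dict.empty)
  (st.1.items, st.2.items)

-- ===== PORT B =====
def build_layer_mapping_alt (groups : List (String × List String)) :
    (List (String × String)) × (List (String × String × String)) :=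
  let pairs := groups.flatMap (fun gl => gl.2.map (fun L => (gl.1, L)))
  let index := pairs.foldl
    (fun (d : PySem.Dict String (List String)) p => d.modify p.2 [] (· ++ [p.1]))
    PySem.Dict.empty
  let layer_to_group := PySem.Dict.ofList
    (index.items.map (fun q => (q.1, PySem.List.pyGetD q.2 0 "")))
  let cc := pairs.foldl
    (fun (st : PySem.Dict String Int × PySem.Dict String (String × String)) p =>
      let cnt := st.1.insert p.2 (st.1.getD p.2 0 + 1)
      if cnt.getD p.2 0 == 2 then
        -- layer_to_group[L] at a second occurrence: the key is present, so getD is exact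
        (cnt, st.2.insert p.2 (layer_to_group.getD p.2 "", p.1))
      else (cnt, st.2))
    (PySem.Dict.empty, PySem.Dict.empty)
  (layer_to_group.items, cc.2.items)

-- ===== PRECONDITION & SPEC =====
def Spec_build_layer_mapping (groups : List (String × List String)) (out : (List (String × String)) × (List (String × String × String))) : Prop := out = build_layer_mapping_alt groups
instance (groups : List (String × List String)) (out : (List (String × String)) × (List (String × String × String))) : Decidable (Spec_build_layer_mapping groups out) := by unfold Spec_build_layer_mapping; infer_instance

-- ===== CLAIM (what is proved, stated in full; the proofs are below) =====
def Claim_equal_build_layer_mapping : Prop := ∀ (groups : List (String × List String)), Dom_build_layer_mapping groups → Spec_build_layer_mapping groups (build_layer_mapping groups)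

-- ===== LEMMAS AND PROOFS =====

-- Proof-side names for the pieces of both ports, all over the flattened (group, layer) pair stream.
def pvPairs (groups : List (String × List String)) : List (String × String) :=
  groups.flatMap (fun gl => gl.2.map (fun L => (gl.1, L)))

def pvAStep (st : PySem.Dict String String × PySem.Dict String (String × String))
    (p : String × String) : PySem.Dict String String × PySem.Dict String (String × String) :=
  if st.1.contains p.2 then (st.1, st.2.setdefault p.2 (st.1.getD p.2 "", p.1))
  else (st.1.insert p.2 p.1, st.2)

def pvA (ps : List (String × String)) :
    PySem.Dict String String × PySem.Dict String (String × String) :=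
  ps.foldl pvAStep (PySem.Dict.empty, PySem.Dict.empty)

def pvIdx (ps : List (String × String)) : PySem.Dict String (List String) :=
  ps.foldl (fun d p => d.modify p.2 [] (· ++ [p.1])) PySem.Dict.empty

def pvHead (q : String × List String) : String × String := (q.1, PySem.List.pyGetD q.2 0 "")

def pvLTG (ps : List (String × String)) : PySem.Dict String String :=
  PySem.Dict.ofList ((pvIdx ps).items.map pvHead)

def pvBStep (D : PySem.Dict String String)
    (st : PySem.Dict String Int × PySem.Dict String (String × String))
    (p : String × String) : PySem.Dict String Int × PySem.Dict String (String × String) :=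
  let cnt := st.1.insert p.2 (st.1.getD p.2 0 + 1)
  if cnt.getD p.2 0 == 2 then (cnt, st.2.insert p.2 (D.getD p.2 "", p.1))
  else (cnt, st.2)

def pvC (D : PySem.Dict String String) (ps : List (String × String)) :
    PySem.Dict String Int × PySem.Dict String (String × String) :=
  ps.foldl (pvBStep D) (PySem.Dict.empty, PySem.Dict.empty)

theorem pvEnumFold {α β : Type} (G : β → α → β) (xs : List α) :
    ∀ (s : Int) (init : β),
      (PySem.List.enumerate xs s).foldl (fun st gp => G st gp.2) init = xs.foldl G init := by
  induction xs with
  | nil => intro s init; simp [PySem.List.enumerate]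
  | cons x xs ih => intro s init; rw [PySem.List.enumerate_cons]; simp only [List.foldl_cons]; exact ih (s+1) (G init x)

-- A's nested enumerate loop is the flat fold of pvAStep over the pair stream.
theorem pvA_flatten (groups : List (String × List String)) :
    build_layer_mapping groups = ((pvA (pvPairs groups)).1.items, (pvA (pvPairs groups)).2.items) := by
  unfold build_layer_mapping pvA pvPairs pvAStep
  rw [List.foldl_flatMap]
  rw [pvEnumFold (fun st gl => gl.2.foldl (fun (st : PySem.Dict String String × PySem.Dict String (String × String)) L =>
          if st.1.contains L then (st.1, st.2.setdefault L (st.1.getD L "", gl.1))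
          else (st.1.insert L gl.1, st.2)) st) groups 0]
  simp only [List.foldl_map]

theorem pvIdx_keys (ps : List (String × String)) :
    (pvIdx ps).keys = PySem.Set.ofList (ps.map (·.2)) := by
  unfold pvIdx
  rw [PySem.Dict.keys_foldl_modify_key ps (·.2) [] (fun _ p v => v ++ [p.1]) PySem.Dict.empty]
  rfl
theorem pvIdx_nodup (ps : List (String × String)) : (pvIdx ps).keys.Nodup := by
  unfold pvIdx
  exact PySem.Dict.nodup_keys_foldl_modify_key ps (·.2) [] (fun _ p v => v ++ [p.1]) _ (by simp [PySem.Dict.keys_empty])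
theorem pvIdx_getD (ps : List (String × String)) (L : String) :
    (pvIdx ps).getD L [] = (ps.filter (fun p => p.2 == L)).map (·.1) := by
  unfold pvIdx
  have : ps.foldl (fun d p => d.modify p.2 [] (· ++ [p.1])) PySem.Dict.empty
      = (ps.map Prod.swap).foldl (fun d p => d.modify p.1 [] (· ++ [p.2])) PySem.Dict.empty := by
    rw [List.foldl_map]
    rfl
  rw [this, PySem.Dict.getD_foldl_modify_append]
  simp [List.filter_map, List.map_map]
  congr 1

theorem pvB_unfold (groups : List (String × List String)) :
    build_layer_mapping_alt groups =
      ((pvLTG (pvPairs groups)).items, (pvC (pvLTG (pvPairs groups)) (pvPairs groups)).2.items) := rfl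

theorem pvLTG_items (ps : List (String × String)) :
    (pvLTG ps).items = (pvIdx ps).items.map pvHead := by
  unfold pvLTG PySem.Dict.ofList
  have hfresh : ∀ a ∈ (pvIdx ps).items.map pvHead, (PySem.Dict.empty : PySem.Dict String String).contains a.1 = false := by
    intro a _; simp [PySem.Dict.contains_empty]
  have hnd : (((pvIdx ps).items.map pvHead).map (·.1)).Nodup := by
    have : ((pvIdx ps).items.map pvHead).map (·.1) = (pvIdx ps).keys := by
      simp [List.map_map, pvHead, PySem.Dict.keys]
    rw [this]; exact pvIdx_nodup ps
  have := PySem.Dict.items_foldl_insert_fresh ((pvIdx ps).items.map pvHead) (·.1) (·.2)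
      PySem.Dict.empty hfresh hnd
  simpa [PySem.Dict.update, show (PySem.Dict.empty : PySem.Dict String String).items = [] from rfl] using this

theorem pvLTG_getD (ps : List (String × String)) (L : String) (h : L ∈ ps.map (·.2)) :
    (pvLTG ps).getD L "" = PySem.List.pyGetD ((pvIdx ps).getD L []) 0 "" := by
  have hk : L ∈ (pvIdx ps).keys := by rw [pvIdx_keys]; exact (PySem.Set.mem_ofList _ _).mpr h
  have hc : (pvIdx ps).contains L = true := (PySem.Dict.contains_iff_mem_keys _ _).mpr hk
  have hget : (pvIdx ps).get? L = some ((pvIdx ps).getD L []) := by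
    have h' : ((pvIdx ps).get? L).isSome = true := by
      rw [← PySem.Dict.contains_eq_isSome_get?]; exact hc
    cases hv : (pvIdx ps).get? L with
    | none => rw [hv] at h'; simp at h'
    | some v => rw [PySem.Dict.getD_of_get?_eq_some _ _ hv]
  have hmem : (L, (pvIdx ps).getD L []) ∈ (pvIdx ps).items :=
    PySem.Dict.mem_items_of_get?_eq_some _ hget
  have hmem2 : (L, PySem.List.pyGetD ((pvIdx ps).getD L []) 0 "") ∈ (pvLTG ps).items := by
    rw [pvLTG_items]
    exact List.mem_map.mpr ⟨_, hmem, rfl⟩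
  have hndL : (pvLTG ps).keys.Nodup := by
    have : (pvLTG ps).keys = (pvIdx ps).keys := by
      simp [PySem.Dict.keys, pvLTG_items, List.map_map, pvHead]
    rw [this]; exact pvIdx_nodup ps
  exact PySem.Dict.getD_of_mem_items _ hmem2 hndL ""

theorem pvGetD_zero_append (xs : List String) (x : String) (h : xs ≠ []) :
    PySem.List.pyGetD (xs ++ [x]) 0 "" = PySem.List.pyGetD xs 0 "" := by
  cases xs with
  | nil => exact absurd rfl h
  | cons a t => simp [PySem.List.pyGetD_zero_cons]

theorem pvIdx_contains (ps : List (String × String)) (L : String) :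
    (pvIdx ps).contains L = decide (L ∈ ps.map (·.2)) := by
  rw [PySem.Dict.contains_eq_decide_mem_keys, pvIdx_keys]
  simp [PySem.Set.mem_ofList]

theorem pvLTG_keys (ps : List (String × String)) : (pvLTG ps).keys = (pvIdx ps).keys := by
  simp [PySem.Dict.keys, pvLTG_items, List.map_map, pvHead]

theorem pvLTG_contains (ps : List (String × String)) (L : String) :
    (pvLTG ps).contains L = decide (L ∈ ps.map (·.2)) := by
  rw [PySem.Dict.contains_eq_decide_mem_keys, pvLTG_keys, pvIdx_keys]
  simp [PySem.Set.mem_ofList]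

theorem pvIdx_entry_ne_nil (ps : List (String × String)) (L : String)
    (h : L ∈ ps.map (·.2)) : (pvIdx ps).getD L [] ≠ [] := by
  rw [pvIdx_getD]
  rcases List.mem_map.mp h with ⟨q, hq, hq2⟩
  have : q ∈ ps.filter (fun p => p.2 == L) := List.mem_filter.mpr ⟨hq, by simp [hq2]⟩
  intro hnil
  rcases List.map_eq_nil_iff.mp hnil with h'
  rw [h'] at this
  exact absurd this (List.not_mem_nil)

theorem pvLTG_stable (ps : List (String × String)) (p : String × String) (L : String)
    (h : L ∈ ps.map (·.2)) :
    (pvLTG (ps ++ [p])).getD L "" = (pvLTG ps).getD L "" := by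
  have h' : L ∈ (ps ++ [p]).map (·.2) := by simp [List.mem_map] at h ⊢; tauto
  rw [pvLTG_getD _ _ h', pvLTG_getD _ _ h, pvIdx_getD, pvIdx_getD, List.filter_append]
  by_cases hp : p.2 = L
  · rw [List.map_append]
    have hf : ((([p] : List (String × String)).filter (fun q => q.2 == L)).map (·.1)) = [p.1] := by
      simp [hp]
    rw [hf]
    exact pvGetD_zero_append _ _ (by
      have := pvIdx_entry_ne_nil ps L h
      rwa [pvIdx_getD] at this)
  · have hf : (([p] : List (String × String)).filter (fun q => q.2 == L)) = [] := by
      simp [hp]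
    rw [hf]
    simp

theorem pvC_fst_fold (D : PySem.Dict String String) (ps : List (String × String)) :
    ∀ st : PySem.Dict String Int × PySem.Dict String (String × String),
      (ps.foldl (pvBStep D) st).1
        = (ps.map (·.2)).foldl (fun d x => d.insert x (d.getD x 0 + 1)) st.1 := by
  induction ps with
  | nil => intro st; rfl
  | cons p ps ih =>
    intro st
    simp only [List.foldl_cons, List.map_cons]
    rw [ih]
    congr 1
    unfold pvBStep
    dsimp only
    split <;> rfl

theorem pvC_fst (D : PySem.Dict String String) (ps : List (String × String)) (L : String) :
    (pvC D ps).1.getD L 0 = ((ps.map (·.2)).count L : Int) := by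
  unfold pvC
  rw [pvC_fst_fold]
  rw [PySem.Dict.getD_foldl_insert_add_one]
  simp [PySem.Dict.getD_empty]

theorem pvC_congr_fold (D D' : PySem.Dict String String) (ps : List (String × String)) :
    ∀ st, (∀ L ∈ ps.map (·.2), D.getD L "" = D'.getD L "") →
      ps.foldl (pvBStep D) st = ps.foldl (pvBStep D') st := by
  induction ps with
  | nil => intro st _; rfl
  | cons p ps ih =>
    intro st h
    simp only [List.foldl_cons]
    have hp : D.getD p.2 "" = D'.getD p.2 "" := h _ (by simp)
    have hstep : pvBStep D st p = pvBStep D' st p := by unfold pvBStep; rw [hp]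
    rw [hstep]
    exact ih _ (fun L hL => h L (by simp at hL ⊢; tauto))

theorem pvC_congr (D D' : PySem.Dict String String) (ps : List (String × String))
    (h : ∀ L ∈ ps.map (·.2), D.getD L "" = D'.getD L "") :
    pvC D ps = pvC D' ps := pvC_congr_fold D D' ps _ h

theorem pvMain (ps : List (String × String)) :
    (pvA ps).1 = pvLTG ps ∧
    (pvA ps).2 = (pvC (pvLTG ps) ps).2 ∧
    (∀ L, (pvA ps).2.contains L = decide (2 ≤ (ps.map (·.2)).count L)) := by
  induction ps using List.reverseRecOn with
  | nil =>
    refine ⟨rfl, rfl, ?_⟩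
    intro L
    simp [pvA, PySem.Dict.contains_empty]
  | append_singleton ps p ih =>
    obtain ⟨ih1, ih2, ih3⟩ := ih
    have hA : pvA (ps ++ [p]) = pvAStep (pvA ps) p := by
      unfold pvA; rw [List.foldl_append]; rfl
    have hC : ∀ D, pvC D (ps ++ [p]) = pvBStep D (pvC D ps) p := fun D => by
      unfold pvC; rw [List.foldl_append]; rfl
    have hI : pvIdx (ps ++ [p]) = (pvIdx ps).modify p.2 [] (· ++ [p.1]) := by
      unfold pvIdx; rw [List.foldl_append]; rfl
    have hmc : (pvA ps).1.contains p.2 = decide (p.2 ∈ ps.map (·.2)) := by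
      rw [ih1, pvLTG_contains]
    have hstab : ∀ L ∈ ps.map (·.2), (pvLTG (ps ++ [p])).getD L "" = (pvLTG ps).getD L "" :=
      fun L hL => pvLTG_stable ps p L hL
    have hCC : pvC (pvLTG (ps ++ [p])) ps = pvC (pvLTG ps) ps :=
      pvC_congr _ _ ps hstab
    have hcount : (pvC (pvLTG ps) ps).1.getD p.2 0 = ((ps.map (·.2)).count p.2 : Int) :=
      pvC_fst _ ps p.2
    have hmap : (ps ++ [p]).map (·.2) = ps.map (·.2) ++ [p.2] := by simp
    by_cases hmem : p.2 ∈ ps.map (·.2)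
    · -- p.2 already owned: A keeps the owner and (maybe) records the conflict
      have hmc' : (pvA ps).1.contains p.2 = true := by rw [hmc]; simpa using hmem
      have hic : (pvIdx ps).contains p.2 = true := by rw [pvIdx_contains]; simpa using hmem
      have hne : (pvIdx ps).getD p.2 [] ≠ [] := pvIdx_entry_ne_nil ps p.2 hmem
      have hAs : pvA (ps ++ [p])
          = ((pvA ps).1, (pvA ps).2.setdefault p.2 ((pvA ps).1.getD p.2 "", p.1)) := by
        rw [hA]; unfold pvAStep; rw [if_pos hmc']
      have hn1 : 1 ≤ (ps.map (·.2)).count p.2 := List.count_pos_iff.mpr hmem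
      have hG1 : (pvA (ps ++ [p])).1 = pvLTG (ps ++ [p]) := by
        rw [hAs]
        apply PySem.Dict.ext
        rw [pvLTG_items, hI]
        have hmod : (pvIdx ps).modify p.2 [] (· ++ [p.1])
            = (pvIdx ps).insert p.2 ((pvIdx ps).getD p.2 [] ++ [p.1]) := rfl
        rw [hmod, PySem.Dict.items_insert_of_contains _ _ hic]
        rw [List.map_map]
        have hitems : (pvA ps).1.items = (pvIdx ps).items.map pvHead := by
          rw [ih1, pvLTG_items]
        rw [hitems]
        refine (List.map_congr_left ?_).symm
        intro q hq
        by_cases hq1 : q.1 == p.2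
        · have hq1' : q.1 = p.2 := eq_of_beq hq1
          have hqv : (pvIdx ps).getD q.1 [] = q.2 :=
            PySem.Dict.getD_of_mem_items _ (by rwa [← Prod.mk.eta (p := q)] at hq) (pvIdx_nodup ps) []
          have hq2 : q.2 = (pvIdx ps).getD p.2 [] := by rw [← hq1', hqv]
          simp only [Function.comp_apply, hq1, if_pos]
          unfold pvHead
          rw [← hq2]
          refine Prod.ext (by simp [hq1']) ?_
          simp only
          rw [pvGetD_zero_append _ _ (hq2 ▸ hne)]
        · simp only [Function.comp_apply, hq1]
          simp at hq1
          simp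
      have hval : (pvA ps).1.getD p.2 "" = (pvLTG (ps ++ [p])).getD p.2 "" := by
        rw [ih1, hstab p.2 hmem]
      have hcnt2 : ((pvC (pvLTG ps) ps).1.insert p.2
          ((pvC (pvLTG ps) ps).1.getD p.2 0 + 1)).getD p.2 0
          = ((ps.map (·.2)).count p.2 : Int) + 1 := by
        rw [PySem.Dict.getD_insert_self, hcount]
      have hG2 : (pvA (ps ++ [p])).2 = (pvC (pvLTG (ps ++ [p])) (ps ++ [p])).2 := by
        rw [hAs, hC, hCC]
        unfold pvBStep
        dsimp only
        rw [hcnt2]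
        rcases Nat.lt_or_ge ((ps.map (·.2)).count p.2) 2 with hlt | hge
        · have hn : (ps.map (·.2)).count p.2 = 1 := by omega
          have hcond : ((((ps.map (·.2)).count p.2 : Int) + 1) == 2) = true := by
            rw [hn]; decide
          rw [if_pos hcond]
          have hcf : (pvA ps).2.contains p.2 = false := by
            rw [ih3 p.2, hn]; decide
          rw [PySem.Dict.setdefault_of_not_contains _ _ hcf, ih2]
          simp only
          rw [hval]
        · have hcond : ((((ps.map (·.2)).count p.2 : Int) + 1) == 2) = false := by
            simp only [beq_eq_false_iff_ne, ne_eq]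
            intro hcontra
            omega
          rw [if_neg (by simp [hcond])]
          have hct : (pvA ps).2.contains p.2 = true := by
            rw [ih3 p.2]; simpa using hge
          rw [PySem.Dict.setdefault_of_contains _ _ hct, ih2]
      refine ⟨hG1, hG2, ?_⟩
      intro L
      rw [hAs]
      simp only
      rw [PySem.Dict.contains_setdefault, hmap, List.count_append]
      by_cases hL : L = p.2
      · subst hL
        simp only [beq_self_eq_true, Bool.true_or]
        have hc1 : List.count p.2 [p.2] = 1 := by simp
        rw [hc1]
        symm
        simp only [decide_eq_true_eq]
        omega
      · have hLb : (L == p.2) = false := by simpa using hL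
        rw [hLb, Bool.false_or, ih3 L]
        have hc0 : (List.count L [p.2]) = 0 := by simp [Ne.symm hL]
        rw [hc0]
        norm_num
    · -- fresh layer: A inserts the owner
      have hmc' : (pvA ps).1.contains p.2 = false := by rw [hmc]; simpa using hmem
      have hic : (pvIdx ps).contains p.2 = false := by rw [pvIdx_contains]; simpa using hmem
      have hAs : pvA (ps ++ [p]) = ((pvA ps).1.insert p.2 p.1, (pvA ps).2) := by
        rw [hA]; unfold pvAStep; rw [if_neg (by simp [hmc'])]
      have hn0 : (ps.map (·.2)).count p.2 = 0 := by
        exact List.count_eq_zero.mpr hmem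
      have hG1 : (pvA (ps ++ [p])).1 = pvLTG (ps ++ [p]) := by
        rw [hAs]
        apply PySem.Dict.ext
        rw [pvLTG_items, hI]
        have hmod : (pvIdx ps).modify p.2 [] (· ++ [p.1])
            = (pvIdx ps).insert p.2 ((pvIdx ps).getD p.2 [] ++ [p.1]) := rfl
        have hgd : (pvIdx ps).getD p.2 [] = [] := PySem.Dict.getD_of_not_contains _ _ hic
        rw [hmod, hgd, PySem.Dict.items_insert_of_not_contains _ _ hic,
            List.map_append, PySem.Dict.items_insert_of_not_contains _ _ hmc']
        have hitems : (pvA ps).1.items = (pvIdx ps).items.map pvHead := by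
          rw [ih1, pvLTG_items]
        rw [hitems]
        simp [pvHead, PySem.List.pyGetD_zero_cons]
      have hG2 : (pvA (ps ++ [p])).2 = (pvC (pvLTG (ps ++ [p])) (ps ++ [p])).2 := by
        rw [hAs, hC, hCC]
        unfold pvBStep
        dsimp only
        have hcnt2 : ((pvC (pvLTG ps) ps).1.insert p.2
            ((pvC (pvLTG ps) ps).1.getD p.2 0 + 1)).getD p.2 0 = 1 := by
          rw [PySem.Dict.getD_insert_self, hcount, hn0]
          simp
        rw [hcnt2]
        rw [if_neg (by decide)]
        exact ih2
      refine ⟨hG1, hG2, ?_⟩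
      intro L
      rw [hAs]
      simp only
      rw [hmap, List.count_append, ih3 L]
      by_cases hL : L = p.2
      · subst hL
        rw [hn0]
        simp
      · have hc0 : (List.count L [p.2]) = 0 := by simp [Ne.symm hL]
        rw [hc0]
        norm_num

-- ===== VERDICT (by name: the statement is the Claim_ definition above) =====
theorem build_layer_mapping_spec : Claim_equal_build_layer_mapping := by
  intro groups _
  unfold Spec_build_layer_mapping
  rw [pvA_flatten, pvB_unfold]
  obtain ⟨h1, h2, -⟩ := pvMain (pvPairs groups)
  rw [h1, h2]
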